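-- pv_equiv track=rewrite | github.com/aeloi98/ipn_lis | pergunta#2/MudaLetras.py | MudaLetras
-- ===== SOURCE A (Python) =====
-- def MudaLetras(str):
--     vogais = ['a','e','i','o','u']
--     listStr = list(str)
--     count = 0
--     for i in listStr:
--         # passo 1 - verifica se i é um caráter do alfabeto
--         if i.isalpha():
--             # se for 'Z' ou z é necessário "dar a volta" ao alfabeto
--             if i == 'Z' or i == 'z':
--                 listStr[count] = chr(ord(i)-25)
--             else:
--                 listStr[count] = chr(ord(i)+1)
--             # passo 2 - verifica se o caráter é uma vogal minúscula
--             if listStr[count] in vogais: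
--                 listStr[count] = chr(ord(listStr[count])-32)
--         count += 1
--     res  = ''.join(listStr)
--     return res
-- ===== SOURCE B (Python) =====
-- _TABLE = str.maketrans("abcdefghijklmnopqrstuvwxyzABCDEFGHIJKLMNOPQRSTUVWXYZ",
--                        "bcdEfghIjklmnOpqrstUvwxyzABCDEFGHIJKLMNOPQRSTUVWXYZA")
--
-- def MudaLetras(str):
--     return str.translate(_TABLE)
-- ===== Notes on version B (the rewrite author's own statement) =====
-- stated objective: idiomatic
-- what changed: Replaces the per-character branching loop (isalpha test, z/Z wraparound arithmetic, vowel uppercasing) by a fixed 52-letter translation table built once with str.maketrans and applied with str.translate; non-letters are untouched by being absent from the table.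
import Mathlib
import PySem

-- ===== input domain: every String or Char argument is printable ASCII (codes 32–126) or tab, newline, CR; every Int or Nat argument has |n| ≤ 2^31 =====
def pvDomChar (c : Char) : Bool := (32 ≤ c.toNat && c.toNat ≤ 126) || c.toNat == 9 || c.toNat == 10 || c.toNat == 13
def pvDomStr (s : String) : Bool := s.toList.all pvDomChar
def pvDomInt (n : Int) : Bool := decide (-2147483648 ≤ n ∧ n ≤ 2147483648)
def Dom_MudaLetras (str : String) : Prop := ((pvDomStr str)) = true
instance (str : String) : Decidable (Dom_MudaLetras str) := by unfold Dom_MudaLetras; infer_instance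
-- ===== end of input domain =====

-- B replaces A's per-character branching loop by a fixed 52-letter translation table applied in one pass (idiomatic; same cost).

-- ===== PORT A =====
-- chr/ord are ported by hand as Char.ofNat/Char.toNat (exact: all codes involved are ASCII, < 0xd800).
-- The loop body, on the state (listStr, count)
def aLoop (st : List Char × Int) (i : Char) : List Char × Int :=
  let vogais : List Char := ['a', 'e', 'i', 'o', 'u']
  let ls := st.1
  let count := st.2
  let ls :=
    if PySem.Chars.isalpha i then
      let ls :=
        if i == 'Z' || i == 'z' then PySem.List.pySetD ls count (Char.ofNat (i.toNat - 25))
        else PySem.List.pySetD ls count (Char.ofNat (i.toNat + 1))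
      if vogais.contains (PySem.List.pyGetD ls count ' ')
      then PySem.List.pySetD ls count (Char.ofNat ((PySem.List.pyGetD ls count ' ').toNat - 32))
      else ls
    else ls
  (ls, count + 1)

def MudaLetras (str : String) : String :=
  let listStr := str.toList
  let final := listStr.foldl aLoop (listStr, 0)
  String.mk final.1

-- ===== PORT B =====
-- str.maketrans(src, dst): a dict mapping each char of src to the char of dst at the same position.
def mudaTable : PySem.Dict Char Char :=
  (List.zip "abcdefghijklmnopqrstuvwxyzABCDEFGHIJKLMNOPQRSTUVWXYZ".toList
            "bcdEfghIjklmnOpqrstUvwxyzABCDEFGHIJKLMNOPQRSTUVWXYZA".toList).foldl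
    (fun d p => d.insert p.1 p.2) PySem.Dict.empty

-- str.translate(table): each char is replaced by its table entry, left unchanged when absent.
def MudaLetras_alt (str : String) : String :=
  String.mk (str.toList.map (fun c => mudaTable.getD c c))

-- ===== PRECONDITION & SPEC =====
def Spec_MudaLetras (str : String) (out : String) : Prop := out = MudaLetras_alt str
instance (str : String) (out : String) : Decidable (Spec_MudaLetras str out) := by unfold Spec_MudaLetras; infer_instance

-- ===== CLAIM (what is proved, stated in full; the proofs are below) =====
def Claim_equal_MudaLetras : Prop := ∀ (str : String), Dom_MudaLetras str → Spec_MudaLetras str (MudaLetras str)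

-- ===== LEMMAS AND PROOFS =====

-- A's per-character transformation, as a pure function
def aChar (i : Char) : Char :=
  if PySem.Chars.isalpha i then
    let v := if i == 'Z' || i == 'z' then Char.ofNat (i.toNat - 25) else Char.ofNat (i.toNat + 1)
    if (['a', 'e', 'i', 'o', 'u'] : List Char).contains v then Char.ofNat (v.toNat - 32) else v
  else i

theorem set_len_append {α : Type} (done : List α) (i v : α) (rest : List α) :
    (done ++ i :: rest).set done.length v = done ++ v :: rest := by
  induction done with
  | nil => rfl
  | cons a as ih => simp [ih]

theorem pySetD_len_append {α : Type} (done : List α) (i v : α) (rest : List α) :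
    PySem.List.pySetD (done ++ i :: rest) (done.length : Int) v = done ++ v :: rest := by
  rw [PySem.List.pySetD_of_nonneg _ _ (by positivity)]
  simpa using set_len_append done i v rest

theorem pyGetD_len_append {α : Type} (done : List α) (v d : α) (rest : List α) :
    PySem.List.pyGetD (done ++ v :: rest) (done.length : Int) d = v := by
  rw [PySem.List.pyGetD_natCast]
  simp

theorem aLoop_step (done : List Char) (i : Char) (rest : List Char) :
    aLoop (done ++ i :: rest, (done.length : Int)) i
      = (done ++ aChar i :: rest, (done.length : Int) + 1) := by
  unfold aLoop aChar
  by_cases ha : PySem.Chars.isalpha i = true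
  · simp only [ha, if_true]
    by_cases hz : (i == 'Z' || i == 'z') = true
    · simp only [hz, if_true, pySetD_len_append, pyGetD_len_append]
      by_cases hv : (['a', 'e', 'i', 'o', 'u'] : List Char).contains (Char.ofNat (i.toNat - 25)) = true
      · simp only [hv, if_true]
      · simp only [hv, if_false, Bool.false_eq_true]
    · simp only [hz, if_false, Bool.false_eq_true, pySetD_len_append, pyGetD_len_append]
      by_cases hv : (['a', 'e', 'i', 'o', 'u'] : List Char).contains (Char.ofNat (i.toNat + 1)) = true
      · simp only [hv, if_true]
      · simp only [hv, if_false, Bool.false_eq_true]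
  · simp only [ha, if_false, Bool.false_eq_true]

theorem muda_fold (rest : List Char) : ∀ done : List Char,
    (rest.foldl aLoop (done ++ rest, (done.length : Int))).1 = done ++ rest.map aChar := by
  induction rest with
  | nil => intro done; simp
  | cons i rest ih =>
    intro done
    rw [List.foldl_cons, aLoop_step]
    have h1 : done ++ aChar i :: rest = (done ++ [aChar i]) ++ rest := by simp
    have h2 : (done.length : Int) + 1 = ((done ++ [aChar i]).length : Int) := by
      simp
    rw [h1, h2, ih]
    simp

set_option maxRecDepth 8000 in
theorem aChar_eq_table_small : ∀ n : Nat, n < 127 →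
    aChar (Char.ofNat n) = mudaTable.getD (Char.ofNat n) (Char.ofNat n) := by decide

theorem aChar_eq_table (c : Char) (h : pvDomChar c = true) :
    aChar c = mudaTable.getD c c := by
  have hlt : c.toNat < 127 := by
    simp [pvDomChar] at h
    omega
  have := aChar_eq_table_small c.toNat hlt
  rwa [Char.ofNat_toNat] at this

-- ===== VERDICT (by name: the statement is the Claim_ definition above) =====
theorem MudaLetras_spec : Claim_equal_MudaLetras := by
  intro str hdom
  show MudaLetras str = MudaLetras_alt str
  have key : (str.toList.foldl aLoop (str.toList, 0)).1 = str.toList.map aChar := by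
    have h := muda_fold str.toList []
    simpa using h
  show String.mk (str.toList.foldl aLoop (str.toList, 0)).1
      = String.mk (str.toList.map (fun c => mudaTable.getD c c))
  rw [key]
  apply congrArg
  apply List.map_congr_left
  intro c hc
  apply aChar_eq_table
  unfold Dom_MudaLetras pvDomStr at hdom
  exact List.all_eq_true.mp hdom c hc
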